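-- pv_equiv track=rewrite | github.com/pypi-data/pypi-mirror-398 | packages/pyaraucaria/pyaraucaria-2.11.2.tar.gz/pyaraucaria-2.11.2/pyaraucaria/libobject.py | conv_spaces
-- ===== SOURCE A (Python) =====
-- def conv_spaces(line):
--     conv = False
--     cline = ""
--     for i, c in enumerate(line):
--         if c == '"':
--             conv = not conv
--         if conv and c == ' ':
--             cline += '_'
--         elif c != '"':
--             cline += c
--     return cline
-- ===== SOURCE B (Python) =====
-- def conv_spaces(line):
--     parts = line.split('"')
--     return ''.join(p.replace(' ', '_') if i % 2 else p
--                    for i, p in enumerate(parts))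
-- ===== Notes on version B (the rewrite author's own statement) =====
-- stated objective: simpler
-- what changed: Replaced the stateful per-character scan carrying an inside-quotes flag by splitting the line on the quote character, converting spaces to underscores only in the odd-indexed (inside-quote) parts, and joining the parts.
import Mathlib
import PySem

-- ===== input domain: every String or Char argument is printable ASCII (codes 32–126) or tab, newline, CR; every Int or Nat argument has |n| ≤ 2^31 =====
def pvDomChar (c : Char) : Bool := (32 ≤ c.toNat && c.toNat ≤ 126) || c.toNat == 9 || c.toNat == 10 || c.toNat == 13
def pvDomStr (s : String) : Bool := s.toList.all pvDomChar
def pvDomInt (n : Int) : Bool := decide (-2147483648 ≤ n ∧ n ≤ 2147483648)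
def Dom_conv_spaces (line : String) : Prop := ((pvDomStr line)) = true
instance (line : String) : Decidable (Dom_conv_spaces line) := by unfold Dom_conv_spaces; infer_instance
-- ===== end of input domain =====

-- B replaces A's stateful character scan by split-on-quote / transform odd parts / join (simpler).

-- ===== PORT A =====
-- literal port of A: fold over enumerate(line) carrying the (conv, cline) state
def conv_spaces (line : String) : String :=
  let st := (PySem.List.enumerate line.toList).foldl
    (fun (st : Bool × List Char) ic =>
      let c := ic.2
      let conv := if c = '"' then !st.1 else st.1
      if conv ∧ c = ' ' then (conv, st.2 ++ ['_'])
      else if c ≠ '"' then (conv, st.2 ++ [c])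
      else (conv, st.2)) (false, ([] : List Char))
  String.ofList st.2

-- ===== PORT B =====
-- literal port of B: parts = line.split('"'); join of p.replace(' ','_') for odd i, p for even i
def conv_spaces_alt (line : String) : String :=
  let parts := PySem.Chars.splitOn line.toList ['"']
  String.ofList (PySem.Chars.join []
    ((PySem.List.enumerate parts).map
      (fun ip => if PySem.Int.mod ip.1 2 ≠ 0 then PySem.Chars.replace ip.2 [' '] ['_'] else ip.2)))

-- ===== PRECONDITION & SPEC =====
def Spec_conv_spaces (line : String) (out : String) : Prop := out = conv_spaces_alt line
instance (line : String) (out : String) : Decidable (Spec_conv_spaces line out) := by unfold Spec_conv_spaces; infer_instance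

-- ===== CLAIM (what is proved, stated in full; the proofs are below) =====
def Claim_equal_conv_spaces : Prop := ∀ (line : String), Dom_conv_spaces line → Spec_conv_spaces line (conv_spaces line)

-- ===== LEMMAS AND PROOFS =====

-- the space→underscore substitution on one character
def pvSub (c : Char) : Char := if c = ' ' then '_' else c

-- reference split on '"' (structural)
def pvSplitQ : List Char → List (List Char)
  | [] => [[]]
  | c :: l =>
    if c = '"' then [] :: pvSplitQ l
    else match pvSplitQ l with
      | [] => [[c]]
      | p :: ps => (c :: p) :: ps

-- prepend a prefix onto the head segment
def pvConsHead (pre : List Char) : List (List Char) → List (List Char)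
  | [] => [pre]
  | p :: ps => (pre ++ p) :: ps

-- reference scan: b = currently inside quotes
def pvGq : Bool → List Char → List Char
  | _, [] => []
  | b, c :: l =>
    if c = '"' then pvGq (!b) l
    else (if b ∧ c = ' ' then '_' else c) :: pvGq b l

-- reference join with alternating transform
def pvJoinAlt : Bool → List (List Char) → List Char
  | _, [] => []
  | b, p :: ps => (if b then p.map pvSub else p) ++ pvJoinAlt (!b) ps

theorem pvSplitQ_ne_nil (l : List Char) : pvSplitQ l ≠ [] := by
  cases l with
  | nil => simp [pvSplitQ]
  | cons c l =>
    simp only [pvSplitQ]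
    split
    · simp
    · cases h : pvSplitQ l <;> simp

theorem pvReplace_go (l : List Char) : ∀ (fuel : Nat) (acc : List Char), l.length ≤ fuel →
    PySem.Chars.replace.go [' '] ['_'] fuel l acc = acc.reverse ++ l.map pvSub := by
  induction l with
  | nil =>
    intro fuel acc _
    cases fuel <;> simp [PySem.Chars.replace.go]
  | cons c l ih =>
    intro fuel acc h
    cases fuel with
    | zero => simp at h
    | succ f =>
      simp only [PySem.Chars.replace.go, List.isPrefixOf]
      by_cases hc : c = ' '
      · simp [hc, ih f _ (by simpa using h), pvSub]
      · have : (' ' == c) = false := by simp; intro h'; exact hc h'.symm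
        simp [this, ih f _ (by simpa using h), pvSub, hc]

theorem pvReplace_eq_map (l : List Char) :
    PySem.Chars.replace l [' '] ['_'] = l.map pvSub := by
  simpa [PySem.Chars.replace] using pvReplace_go l l.length [] le_rfl

theorem pvSplitOn_go (l : List Char) : ∀ (fuel : Nat) (cur : List Char) (acc : List (List Char)), l.length < fuel →
    PySem.Chars.splitOn.go ['"'] fuel l cur acc
      = acc.reverse ++ pvConsHead cur.reverse (pvSplitQ l) := by
  induction l with
  | nil =>
    intro fuel cur acc h
    cases fuel with
    | zero => simp at h
    | succ f => simp [PySem.Chars.splitOn.go, pvSplitQ, pvConsHead]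
  | cons c l ih =>
    intro fuel cur acc h
    cases fuel with
    | zero => simp at h
    | succ f =>
      have hlen : l.length < f := by simpa using h
      by_cases hc : c = '"'
      · have hp : List.isPrefixOf ['"'] (c :: l) = true := by simp [List.isPrefixOf, hc]
        simp only [PySem.Chars.splitOn.go, hp]
        rw [show List.drop (List.length ['"']) (c :: l) = l by simp]
        rw [ih f [] (cur.reverse :: acc) hlen]
        obtain ⟨p, ps, hps⟩ := List.exists_cons_of_ne_nil (pvSplitQ_ne_nil l)
        simp [pvSplitQ, hc, hps, pvConsHead]
      · have hp : List.isPrefixOf ['"'] (c :: l) = false := by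
          simp [List.isPrefixOf]
          intro h'; exact hc h'.symm
        simp only [PySem.Chars.splitOn.go, hp]
        rw [if_neg (by simp)]
        rw [ih f (c :: cur) acc hlen]
        obtain ⟨p, ps, hps⟩ := List.exists_cons_of_ne_nil (pvSplitQ_ne_nil l)
        simp [pvSplitQ, hc, hps, pvConsHead]
  
theorem pvSplitOn_eq (l : List Char) : PySem.Chars.splitOn l ['"'] = pvSplitQ l := by
  rw [PySem.Chars.splitOn, pvSplitOn_go l (l.length + 1) [] [] (by omega)]
  obtain ⟨p, ps, hps⟩ := List.exists_cons_of_ne_nil (pvSplitQ_ne_nil l)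
  simp [hps, pvConsHead]

theorem pvFoldA (l : List Char) : ∀ (s : Int) (conv : Bool) (acc : List Char),
    ((PySem.List.enumerate l s).foldl
      (fun (st : Bool × List Char) ic =>
        let c := ic.2
        let conv := if c = '"' then !st.1 else st.1
        if conv ∧ c = ' ' then (conv, st.2 ++ ['_'])
        else if c ≠ '"' then (conv, st.2 ++ [c])
        else (conv, st.2)) (conv, acc)).2 = acc ++ pvGq conv l := by
  induction l with
  | nil => intro s conv acc; simp [PySem.List.enumerate_nil, pvGq]
  | cons c l ih =>
    intro s conv acc
    rw [PySem.List.enumerate_cons, List.foldl_cons]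
    dsimp only
    by_cases hc : c = '"'
    · subst hc
      rw [if_pos rfl, if_neg (by simp), if_neg (by simp)]
      rw [ih]
      simp [pvGq]
    · rw [if_neg hc]
      by_cases hs : conv = true ∧ c = ' '
      · rw [if_pos hs]
        rw [ih]
        simp [pvGq, hs.1, hs.2]
      · rw [if_neg hs, if_pos (by simp [hc])]
        rw [ih]
        have : ¬ (conv = true ∧ c = ' ') := hs
        simp [pvGq, hc, this]

theorem pvJoinB (parts : List (List Char)) : ∀ (k : Nat),
    PySem.Chars.join []
      ((PySem.List.enumerate parts (k : Int)).map
        (fun ip => if PySem.Int.mod ip.1 2 ≠ 0 then PySem.Chars.replace ip.2 [' '] ['_'] else ip.2))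
      = pvJoinAlt (k % 2 == 1) parts := by
  induction parts with
  | nil => intro k; simp [PySem.List.enumerate_nil, pvJoinAlt, PySem.Chars.join_nil]
  | cons p ps ih =>
    intro k
    rw [PySem.List.enumerate_cons, List.map_cons]
    have hmod : PySem.Int.mod (k : Int) 2 = ((k % 2 : Nat) : Int) := by
      simp [PySem.Int.mod, Int.fmod_eq_emod]
    have hj : ∀ (x : List Char) (xs : List (List Char)),
        PySem.Chars.join [] (x :: xs) = x ++ PySem.Chars.join [] xs := by
      intro x xs
      cases xs with
      | nil => simp [PySem.Chars.join_singleton, PySem.Chars.join_nil]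
      | cons y ys => simp [PySem.Chars.join_cons_cons]
    rw [hj]
    have hk1 : ((k : Int) + 1) = ((k + 1 : Nat) : Int) := by push_cast; ring
    rw [hk1, ih (k + 1)]
    simp only [pvJoinAlt]
    by_cases hk : k % 2 = 1
    · have h2 : (k + 1) % 2 = 0 := by omega
      rw [hmod]
      simp [hk, h2, pvReplace_eq_map]
    · have h0 : k % 2 = 0 := by omega
      have h2 : (k + 1) % 2 = 1 := by omega
      rw [hmod]
      simp [h0, h2]

theorem pvCore (l : List Char) : ∀ (b : Bool), pvGq b l = pvJoinAlt b (pvSplitQ l) := by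
  induction l with
  | nil => intro b; simp [pvGq, pvSplitQ, pvJoinAlt]
  | cons c l ih =>
    intro b
    by_cases hc : c = '"'
    · simp [pvGq, pvSplitQ, hc, pvJoinAlt, ih]
    · obtain ⟨p, ps, hps⟩ := List.exists_cons_of_ne_nil (pvSplitQ_ne_nil l)
      simp only [pvGq, pvSplitQ, if_neg hc, hps]
      rw [ih b, hps]
      simp only [pvJoinAlt]
      by_cases hb : b = true
      · subst hb
        simp [pvSub]
      · have hb' : b = false := by simpa using hb
        subst hb'
        simp

-- ===== VERDICT (by name: the statement is the Claim_ definition above) =====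
theorem conv_spaces_spec : Claim_equal_conv_spaces := by
  intro line _
  unfold Spec_conv_spaces conv_spaces conv_spaces_alt
  dsimp only
  rw [pvSplitOn_eq]
  have h := pvJoinB (pvSplitQ line.toList) 0
  simp only [Nat.cast_zero] at h
  rw [h]
  rw [pvFoldA line.toList 0 false []]
  simp [pvCore]
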